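-- pv_equiv track=rewrite | github.com/SoumyaThoutam/Using-AI-for-Snake-Game | Code/geneticAlgorithm.py | extractBestParents
-- ===== SOURCE A (Python) =====
-- def extractBestParents(parentPop, fitnessScores):
--
-- 	fitnessScoresCopy = fitnessScores.copy()
-- 	fitnessScoresCopy.sort()
--
-- 	maxIndex = len(fitnessScores) - 1
--
-- 	bestScoresCutoffIndex = int(maxIndex*(1/2))
--
-- 	#Get a cutoff value for the median fitness score
-- 	bestScoresCutoff = fitnessScoresCopy[bestScoresCutoffIndex]
--
-- 	bestParents = []
--
-- 	#Find the chromsomes with fitness scores above the cutoff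
-- 	for i in range(len(parentPop)):
--
-- 		if fitnessScores[i] > bestScoresCutoff:
-- 			bestParents.append(parentPop[i])
--
-- 	return bestParents
-- ===== SOURCE B (Python) =====
-- def extractBestParents(parentPop, fitnessScores):
--     # Iterative quickselect: find the k-th smallest fitness (k = median index)
--     # without sorting, then one order-preserving filter pass.
--     xs = fitnessScores
--     k = (len(fitnessScores) - 1) // 2
--     while True:
--         p = xs[len(xs) // 2]
--         lo = [x for x in xs if x < p]
--         if k < len(lo):
--             xs = lo
--             continue
--         eq = sum(1 for x in xs if x == p)
--         if k < len(lo) + eq: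
--             cutoff = p
--             break
--         k -= len(lo) + eq
--         xs = [x for x in xs if x > p]
--     return [c for c, f in zip(parentPop, fitnessScores) if f > cutoff]
-- ===== Notes on version B (the rewrite author's own statement) =====
-- stated objective: alternative
-- what changed: Replaces the full sort of the fitness list with an iterative quickselect that finds the median-index cutoff value, and replaces the index loop with a single zip-filter pass.
import Mathlib
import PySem

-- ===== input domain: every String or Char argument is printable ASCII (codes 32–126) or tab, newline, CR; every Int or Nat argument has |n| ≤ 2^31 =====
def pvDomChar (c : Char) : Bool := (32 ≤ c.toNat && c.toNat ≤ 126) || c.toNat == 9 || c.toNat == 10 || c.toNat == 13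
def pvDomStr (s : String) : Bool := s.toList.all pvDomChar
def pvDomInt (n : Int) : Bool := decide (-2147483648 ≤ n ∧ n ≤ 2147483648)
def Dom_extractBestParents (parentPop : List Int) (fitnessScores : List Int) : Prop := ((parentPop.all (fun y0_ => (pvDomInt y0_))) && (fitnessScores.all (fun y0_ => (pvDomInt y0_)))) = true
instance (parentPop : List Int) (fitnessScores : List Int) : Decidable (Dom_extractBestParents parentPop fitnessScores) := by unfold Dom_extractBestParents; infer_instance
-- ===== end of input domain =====

-- B replaces A's full sort by an iterative quickselect for the median-index cutoff
-- value and A's index loop by one zip-filter pass.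

-- ===== PORT A =====
def extractBestParents (parentPop : List Int) (fitnessScores : List Int) : List Int :=
  let fitnessScoresCopy := PySem.List.sorted fitnessScores (fun x => x) false
  let maxIndex : Int := (fitnessScores.length : Int) - 1
  -- int(maxIndex*(1/2)): exact here (|maxIndex| < 2^53, so maxIndex*0.5 is an exact
  -- float and int() truncates toward zero = Int.tdiv)
  let bestScoresCutoffIndex : Int := maxIndex.tdiv 2
  match PySem.List.pyGet? fitnessScoresCopy bestScoresCutoffIndex with
  | none => []  -- IndexError (empty fitnessScores); excluded by Pre_
  | some bestScoresCutoff =>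
    (PySem.List.pyRange 0 (parentPop.length : Int) 1).foldl
      (fun bestParents i =>
        -- pyGetD is exact under Pre_ (i < len parentPop ≤ len fitnessScores)
        if PySem.List.pyGetD fitnessScores i 0 > bestScoresCutoff then
          bestParents ++ [PySem.List.pyGetD parentPop i 0]
        else bestParents) []

-- ===== PORT B =====
-- Source B's 'while True' quickselect loop as a fuel recursion; fuel = initial list length
-- strictly bounds the number of iterations (each pass shrinks the list), so the
-- 0-fuel default is never reached on the calls extractBestParents_alt makes.
def pvQselect : Nat → List Int → Int → Int
  | 0, _, _ => 0
  | _ + 1, [], _ => 0  -- unreachable under Pre_ (Python raises IndexError on empty list)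
  | fuel + 1, x :: rest, k =>
    let xs := x :: rest
    let p := xs.getD (xs.length / 2) 0
    let lo := xs.filter (fun y => decide (y < p))
    if k < (lo.length : Int) then pvQselect fuel lo k
    else
      let eq : Int := (xs.countP (fun y => y == p) : Int)
      if k < (lo.length : Int) + eq then p
      else pvQselect fuel (xs.filter (fun y => decide (p < y))) (k - (lo.length : Int) - eq)

def extractBestParents_alt (parentPop : List Int) (fitnessScores : List Int) : List Int :=
  let cutoff := pvQselect fitnessScores.length fitnessScores
    (PySem.Int.floordiv ((fitnessScores.length : Int) - 1) 2)
  (parentPop.zip fitnessScores).filterMap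
    (fun cf => if cf.2 > cutoff then some cf.1 else none)

-- ===== PRECONDITION & SPEC =====
-- A raises IndexError on empty fitnessScores and whenever parentPop is longer than
-- fitnessScores (its loop indexes fitnessScores[i] for i < len(parentPop)); exactly
-- those inputs are excluded.
def Pre_extractBestParents (parentPop : List Int) (fitnessScores : List Int) : Prop :=
  fitnessScores ≠ [] ∧ parentPop.length ≤ fitnessScores.length
instance (parentPop : List Int) (fitnessScores : List Int) : Decidable (Pre_extractBestParents parentPop fitnessScores) := by unfold Pre_extractBestParents; infer_instance

def pvWitness_extractBestParents : List Int × List Int := ([1, 2], [3, 4])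

def Spec_extractBestParents (parentPop : List Int) (fitnessScores : List Int) (out : List Int) : Prop := out = extractBestParents_alt parentPop fitnessScores
instance (parentPop : List Int) (fitnessScores : List Int) (out : List Int) : Decidable (Spec_extractBestParents parentPop fitnessScores out) := by unfold Spec_extractBestParents; infer_instance

-- ===== CLAIM (what is proved, stated in full; the proofs are below) =====
def Claim_equal_extractBestParents : Prop := ∀ (parentPop : List Int) (fitnessScores : List Int), Dom_extractBestParents parentPop fitnessScores → Pre_extractBestParents parentPop fitnessScores → Spec_extractBestParents parentPop fitnessScores (extractBestParents parentPop fitnessScores)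


-- ===== LEMMAS AND PROOFS =====

theorem pvPermMid3a {α : Type} (A B C : List α) (a : α) :
    (A ++ (a :: B) ++ C).Perm (a :: (A ++ B ++ C)) := by
  simp only [List.append_assoc, List.cons_append]
  exact List.perm_middle

theorem pvPermMid3b {α : Type} (A B C : List α) (a : α) :
    (A ++ B ++ (a :: C)).Perm (a :: (A ++ B ++ C)) := by
  have h := List.perm_middle (a := a) (l₁ := A ++ B) (l₂ := C)
  simpa [List.append_assoc] using h

theorem pvPartitionPerm (xs : List Int) (p : Int) :
    (xs.filter (fun y => decide (y < p)) ++ xs.filter (fun y => y == p)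
      ++ xs.filter (fun y => decide (p < y))).Perm xs := by
  induction xs with
  | nil => simp
  | cons a t ih =>
    rcases lt_trichotomy a p with h | h | h
    · simpa [List.filter_cons, h, h.ne, not_lt.mpr h.le] using ih.cons a
    · subst h
      simp only [List.filter_cons, decide_eq_true_eq, lt_irrefl, if_false, beq_self_eq_true,
        if_true]
      exact (pvPermMid3a _ _ _ a).trans (ih.cons a)
    · simp only [List.filter_cons, decide_eq_true_eq, not_lt.mpr h.le, if_false,
        beq_iff_eq, h.ne', if_true, h]
      exact (pvPermMid3b _ _ _ a).trans (ih.cons a)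

theorem pvSortedDecomp (xs : List Int) (p : Int) :
    PySem.List.sorted xs (fun x => x) false =
      PySem.List.sorted (xs.filter (fun y => decide (y < p))) (fun x => x) false
      ++ xs.filter (fun y => y == p)
      ++ PySem.List.sorted (xs.filter (fun y => decide (p < y))) (fun x => x) false := by
  apply PySem.List.sorted_id_eq_of_perm_of_pairwise
  · exact ((((PySem.List.sorted_perm _ _ _).append (List.Perm.refl _)).append
      (PySem.List.sorted_perm _ _ _)).trans (pvPartitionPerm xs p))
  · have hL : ∀ y ∈ PySem.List.sorted (xs.filter (fun y => decide (y < p))) (fun x => x) false, y < p := by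
      intro y hy
      have := (PySem.List.mem_sorted _ _ _ _).mp hy
      simpa using (List.mem_filter.mp this).2
    have hE : ∀ y ∈ xs.filter (fun y => y == p), y = p := by
      intro y hy
      simpa using (List.mem_filter.mp hy).2
    have hG : ∀ y ∈ PySem.List.sorted (xs.filter (fun y => decide (p < y))) (fun x => x) false, p < y := by
      intro y hy
      have := (PySem.List.mem_sorted _ _ _ _).mp hy
      simpa using (List.mem_filter.mp this).2
    rw [List.append_assoc, List.pairwise_append, List.pairwise_append]
    refine ⟨PySem.List.sorted_pairwise _ _, ⟨?_, PySem.List.sorted_pairwise _ _, ?_⟩, ?_⟩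
    · exact List.pairwise_of_forall_mem_list (fun a ha b hb => by rw [hE a ha, hE b hb])
    · intro a ha b hb; rw [hE a ha]; exact (hG b hb).le
    · intro a ha b hb
      rcases List.mem_append.mp hb with hb | hb
      · rw [hE b hb]; exact (hL a ha).le
      · exact ((hL a ha).trans (hG b hb)).le

theorem pvFilterLtLength {α : Type} (l : List α) (q : α → Bool) (a : α)
    (ha : a ∈ l) (hq : q a = false) : (l.filter q).length < l.length := by
  rw [List.length_filter_lt_length_iff_exists]
  exact ⟨a, ha, by simp [hq]⟩

theorem pvGetD3a {A B C : List Int} {n : Nat} (h : n < A.length) :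
    ((A ++ B) ++ C).getD n 0 = A.getD n 0 := by
  rw [List.getD_append _ _ _ _ (by simp; omega), List.getD_append _ _ _ _ h]

theorem pvGetD3bEq {A B C : List Int} {n : Nat} {p : Int} (hA : A.length ≤ n)
    (hB : n < A.length + B.length) (hall : ∀ y ∈ B, y == p) :
    ((A ++ B) ++ C).getD n 0 = p := by
  rw [List.getD_append _ _ _ _ (by simp; omega), List.getD_append_right _ _ _ _ hA,
    List.getD_eq_getElem _ 0 (by omega)]
  simpa using hall _ (List.getElem_mem (by omega))

theorem pvGetD3c {A B C : List Int} {n : Nat} (h : A.length + B.length ≤ n) :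
    ((A ++ B) ++ C).getD n 0 = C.getD (n - A.length - B.length) 0 := by
  rw [List.getD_append_right _ _ _ _ (by simp; omega)]
  simp only [List.length_append]
  congr 1
  omega

theorem pvQselect_eq_sorted : ∀ (fuel : Nat) (xs : List Int) (k : Int),
    xs.length ≤ fuel → 0 ≤ k → k < (xs.length : Int) →
    pvQselect fuel xs k = (PySem.List.sorted xs (fun x => x) false).getD k.toNat 0 := by
  intro fuel
  induction fuel with
  | zero => intro xs k hf h0 h1; exact absurd h1 (by simpa using by omega)
  | succ fuel ih =>
    intro xs k hf h0 h1
    match xs with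
    | [] => exact absurd h1 (by simpa using h0)
    | x :: rest =>
      have hpmem : (x :: rest).getD ((x :: rest).length / 2) 0 ∈ x :: rest := by
        rw [List.getD_eq_getElem _ 0 (by simp; omega)]; exact List.getElem_mem _
      have hLlt : ((x :: rest).filter (fun y => decide (y < (x :: rest).getD ((x :: rest).length / 2) 0))).length < (x :: rest).length :=
        pvFilterLtLength _ _ _ hpmem (by simp)
      have hGlt : ((x :: rest).filter (fun y => decide ((x :: rest).getD ((x :: rest).length / 2) 0 < y))).length < (x :: rest).length :=
        pvFilterLtLength _ _ _ hpmem (by simp)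
      have hlen : ((x :: rest).filter (fun y => decide (y < (x :: rest).getD ((x :: rest).length / 2) 0))).length
          + ((x :: rest).filter (fun y => y == (x :: rest).getD ((x :: rest).length / 2) 0)).length
          + ((x :: rest).filter (fun y => decide ((x :: rest).getD ((x :: rest).length / 2) 0 < y))).length
          = (x :: rest).length := by
        have h := (pvPartitionPerm (x :: rest) ((x :: rest).getD ((x :: rest).length / 2) 0)).length_eq
        simpa [Nat.add_assoc] using h
      have hcnt0 : (x :: rest).countP (fun y => y == (x :: rest).getD ((x :: rest).length / 2) 0)
          = ((x :: rest).filter (fun y => y == (x :: rest).getD ((x :: rest).length / 2) 0)).length :=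
        List.countP_eq_length_filter
      have hdec := pvSortedDecomp (x :: rest) ((x :: rest).getD ((x :: rest).length / 2) 0)
      have hLs : (PySem.List.sorted ((x :: rest).filter (fun y => decide (y < (x :: rest).getD ((x :: rest).length / 2) 0))) (fun x => x) false).length
          = ((x :: rest).filter (fun y => decide (y < (x :: rest).getD ((x :: rest).length / 2) 0))).length :=
        PySem.List.length_sorted _ _ _
      rw [show pvQselect (fuel + 1) (x :: rest) k =
        (if k < (((x :: rest).filter (fun y => decide (y < (x :: rest).getD ((x :: rest).length / 2) 0))).length : Int) then
          pvQselect fuel ((x :: rest).filter (fun y => decide (y < (x :: rest).getD ((x :: rest).length / 2) 0))) k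
         else if k < (((x :: rest).filter (fun y => decide (y < (x :: rest).getD ((x :: rest).length / 2) 0))).length : Int)
             + ((x :: rest).countP (fun y => y == (x :: rest).getD ((x :: rest).length / 2) 0) : Int) then
           (x :: rest).getD ((x :: rest).length / 2) 0
         else pvQselect fuel ((x :: rest).filter (fun y => decide ((x :: rest).getD ((x :: rest).length / 2) 0 < y)))
           (k - (((x :: rest).filter (fun y => decide (y < (x :: rest).getD ((x :: rest).length / 2) 0))).length : Int)
              - ((x :: rest).countP (fun y => y == (x :: rest).getD ((x :: rest).length / 2) 0) : Int)))
        from rfl]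
      rw [hcnt0, hdec]
      split_ifs with hk1 hk2
      · rw [ih _ k (by omega) h0 (by exact_mod_cast hk1)]
        refine (pvGetD3a ?_).symm
        rw [hLs]; omega
      · refine (pvGetD3bEq ?_ ?_ ?_).symm
        · rw [hLs]; omega
        · rw [hLs]; omega
        · intro y hy; exact (List.mem_filter.mp hy).2
      · rw [ih _ _ (by omega) (by omega) (by omega)]
        refine Eq.symm ((pvGetD3c ?_).trans ?_)
        · rw [hLs]; omega
        · congr 1
          rw [hLs]
          omega

theorem pvZipTake {α β : Type} : ∀ (l₁ : List α) (l₂ : List β) (n : Nat),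
    l₁.length ≤ n → l₁.zip l₂ = l₁.zip (l₂.take n) := by
  intro l₁
  induction l₁ with
  | nil => simp
  | cons a t ih =>
    intro l₂ n h
    cases l₂ with
    | nil => simp
    | cons b s =>
      cases n with
      | zero => simp at h
      | succ m => simp [List.zip_cons_cons, ih s m (by simpa using h)]

theorem pvZipTakeSucc {α β : Type} (ps : List α) (fs : List β) (n : Nat)
    (hn : n < ps.length) (hf : n < fs.length) :
    (ps.take (n + 1)).zip fs = (ps.take n).zip fs ++ [(ps[n], fs[n])] := by
  rw [List.take_add_one, List.getElem?_eq_getElem hn]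
  rw [pvZipTake (ps.take n) fs n (by simp),
    pvZipTake (ps.take n ++ _) fs (n + 1) (by simp)]
  rw [show fs.take (n + 1) = fs.take n ++ [fs[n]] from by
    rw [List.take_add_one, List.getElem?_eq_getElem hf]; rfl]
  rw [List.zip_append (by simp [Nat.min_eq_left hn.le, Nat.min_eq_left hf.le])]
  simp

theorem pvLoopEq (c : Int) (ps fs : List Int) (hlen : ps.length ≤ fs.length) :
    ∀ n : Nat, n ≤ ps.length →
    (PySem.List.pyRange 0 (n : Int) 1).foldl
      (fun acc i => if PySem.List.pyGetD fs i 0 > c then acc ++ [PySem.List.pyGetD ps i 0] else acc) []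
    = ((ps.take n).zip fs).filterMap (fun cf => if cf.2 > c then some cf.1 else none) := by
  intro n
  induction n with
  | zero => simp [PySem.List.pyRange_one_eq_nil]
  | succ n ih =>
    intro h
    have hn : n < ps.length := by omega
    have hf : n < fs.length := by omega
    have hcast : ((n + 1 : Nat) : Int) = (n : Int) + 1 := by push_cast; ring
    rw [hcast, PySem.List.pyRange_one_succ_right (by positivity), List.foldl_append]
    simp only [List.foldl_cons, List.foldl_nil]
    rw [ih (by omega), pvZipTakeSucc ps fs n hn hf, List.filterMap_append]
    rw [PySem.List.pyGetD_natCast, PySem.List.pyGetD_natCast,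
      List.getD_eq_getElem fs 0 hf, List.getD_eq_getElem ps 0 hn]
    by_cases hc : fs[n] > c <;> simp [hc]

-- ===== VERDICT (by name: the statement is the Claim_ definition above) =====
theorem extractBestParents_spec : Claim_equal_extractBestParents := by
  unfold Claim_equal_extractBestParents
  intro ps fs _ hpre
  obtain ⟨hne, hle⟩ := hpre
  have hpos : 0 < fs.length := List.length_pos_iff.mpr hne
  unfold Spec_extractBestParents extractBestParents extractBestParents_alt
  have hidx : ((fs.length : Int) - 1).tdiv 2 = ((fs.length : Int) - 1) / 2 := by
    have h0 : (0 : Int) ≤ (fs.length : Int) - 1 := by omega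
    rw [Int.tdiv_eq_ediv, if_pos (Or.inl h0), add_zero]
  have hflo : PySem.Int.floordiv ((fs.length : Int) - 1) 2 = ((fs.length : Int) - 1) / 2 :=
    PySem.Int.floordiv_eq_ediv_of_pos (by omega)
  have hk0 : (0 : Int) ≤ ((fs.length : Int) - 1) / 2 := by omega
  have hk1 : ((fs.length : Int) - 1) / 2 < (fs.length : Int) := by omega
  have hso : (PySem.List.sorted fs (fun x => x) false).length = fs.length :=
    PySem.List.length_sorted _ _ _
  dsimp only
  rw [hidx]
  rw [PySem.List.pyGet?_eq_some_getElem _ hk0 (by omega : ((fs.length : Int) - 1) / 2 < ((PySem.List.sorted fs (fun x => x) false).length : Int))]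
  dsimp only
  rw [hflo, pvQselect_eq_sorted fs.length fs _ (le_refl _) hk0 hk1]
  rw [pvLoopEq _ ps fs hle ps.length (le_refl _), List.take_length]
  rw [List.getD_eq_getElem _ 0 (by omega)]
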